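-- pv_equiv track=rewrite | github.com/CyrillSchwyter/awd | aufgabe2/graphiken.py | get_ticks
-- ===== SOURCE A (Python) =====
-- def get_ticks(counts_values: int, amount_statistics: int):
--     """
--     Berechnet die X-Achsenpositionen fuer die Balken eines Balkendiagrammes
--     :param counts_values: werte pro angezeigte Statisik
--     :param amount_statistics: anzahl verschie
--     :return: zweidimensionales array mit den positionen fuer die balken
--     """
--     result = []
--     for x in range(amount_statistics):
--         newlist = []
--         result.append(newlist)
--     div = -1
--     counts_divider: int = counts_values * amount_statistics
--     for x in range(counts_divider):
--         div = (div + 1) % amount_statistics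
--         result[div].append(x)
--
--     return result
-- ===== SOURCE B (Python) =====
-- def get_ticks(counts_values: int, amount_statistics: int):
--     total = counts_values * amount_statistics
--     return [list(range(i, total, amount_statistics))
--             for i in range(amount_statistics)]
-- ===== Notes on version B (the rewrite author's own statement) =====
-- stated objective: simpler
-- what changed: B builds each statistic's row directly as a strided range (i, i+k, i+2k, ...) instead of A's single round-robin pass that dispatches every flat index through a modular counter into pre-allocated rows.
import Mathlib
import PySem

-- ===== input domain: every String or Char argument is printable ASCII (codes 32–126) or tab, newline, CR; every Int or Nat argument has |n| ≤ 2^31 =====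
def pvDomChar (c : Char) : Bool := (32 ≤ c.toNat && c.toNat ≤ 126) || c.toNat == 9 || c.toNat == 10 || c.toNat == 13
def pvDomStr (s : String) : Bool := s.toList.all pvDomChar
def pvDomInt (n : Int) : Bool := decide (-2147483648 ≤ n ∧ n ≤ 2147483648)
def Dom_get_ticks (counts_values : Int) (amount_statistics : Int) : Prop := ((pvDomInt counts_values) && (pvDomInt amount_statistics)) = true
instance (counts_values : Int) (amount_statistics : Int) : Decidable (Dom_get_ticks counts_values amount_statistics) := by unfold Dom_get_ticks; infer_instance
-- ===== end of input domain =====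

-- B replaces A's flat round-robin dispatch pass by building each row directly as a strided range (simpler decomposition, same cost).

-- ===== PORT A =====
def get_ticks (counts_values : Int) (amount_statistics : Int) : List (List Int) :=
  -- result = []; for x in range(amount_statistics): result.append([])
  let result : List (List Int) :=
    (PySem.List.pyRange 0 amount_statistics 1).foldl (fun r _x => r ++ [([] : List Int)]) []
  -- div = -1; counts_divider = counts_values * amount_statistics
  let counts_divider : Int := counts_values * amount_statistics
  -- for x in range(counts_divider): div = (div+1) % amount_statistics; result[div].append(x)
  ((PySem.List.pyRange 0 counts_divider 1).foldl
      (fun (st : List (List Int) × Int) x =>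
        let div := PySem.Int.mod (st.2 + 1) amount_statistics
        (PySem.List.pySetD st.1 div (PySem.List.pyGetD st.1 div ([] : List Int) ++ [x]), div))
      (result, -1)).1

-- ===== PORT B =====
def get_ticks_alt (counts_values : Int) (amount_statistics : Int) : List (List Int) :=
  let total : Int := counts_values * amount_statistics
  (PySem.List.pyRange 0 amount_statistics 1).map
    (fun i => PySem.List.pyRange i total amount_statistics)

-- ===== PRECONDITION & SPEC =====
-- Pre_ excludes exactly the inputs where A raises IndexError: both arguments negative
-- (then counts_divider > 0 drives the dispatch loop, but the row list is empty).
def Pre_get_ticks (counts_values : Int) (amount_statistics : Int) : Prop :=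
  0 ≤ counts_values ∨ 0 ≤ amount_statistics
instance (counts_values : Int) (amount_statistics : Int) : Decidable (Pre_get_ticks counts_values amount_statistics) := by unfold Pre_get_ticks; infer_instance

def pvWitness_get_ticks : Int × Int := (3, 2)


def Spec_get_ticks (counts_values : Int) (amount_statistics : Int) (out : List (List Int)) : Prop := out = get_ticks_alt counts_values amount_statistics
instance (counts_values : Int) (amount_statistics : Int) (out : List (List Int)) : Decidable (Spec_get_ticks counts_values amount_statistics out) := by unfold Spec_get_ticks; infer_instance

-- ===== CLAIM (what is proved, stated in full; the proofs are below) =====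
def Claim_equal_get_ticks : Prop := ∀ (counts_values : Int) (amount_statistics : Int), Dom_get_ticks counts_values amount_statistics → Pre_get_ticks counts_values amount_statistics → Spec_get_ticks counts_values amount_statistics (get_ticks counts_values amount_statistics)

-- ===== LEMMAS AND PROOFS =====

-- the body of A's dispatch loop, named so the fold can be reasoned about
def stepA (amount_statistics : Int) (st : List (List Int) × Int) (x : Int) : List (List Int) × Int :=
  let div := PySem.Int.mod (st.2 + 1) amount_statistics
  (PySem.List.pySetD st.1 div (PySem.List.pyGetD st.1 div ([] : List Int) ++ [x]), div)

lemma get_ticks_eq (cv as : Int) :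
    get_ticks cv as =
      ((PySem.List.pyRange 0 (cv * as) 1).foldl (stepA as)
        ((PySem.List.pyRange 0 as 1).foldl (fun r _x => r ++ [([] : List Int)]) [], -1)).1 := rfl

lemma mod_pos_eq (a b : Int) (h : 0 < b) : PySem.Int.mod a b = a % b := by
  simp [PySem.Int.mod, Int.fmod_eq_emod_of_nonneg _ h.le]

lemma stride_nil (as i b : Int) (has : 0 < as) (h : b ≤ i) :
    PySem.List.pyRange i b as = [] := by
  rw [PySem.List.pyRange_of_pos _ _ has, if_neg (by omega)]
  simp

-- extending the upper bound of a strided range by one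
lemma stride_succ (as i k : Int) (has : 0 < as) (_h0 : 0 ≤ i) (hik : i ≤ k) :
    PySem.List.pyRange i (k + 1) as =
      PySem.List.pyRange i k as ++ (if k % as = i % as then [k] else []) := by
  rw [PySem.List.pyRange_of_pos _ _ has, PySem.List.pyRange_of_pos _ _ has,
      if_pos (by omega)]
  set d : Int := k - i with hd
  have hd0 : 0 ≤ d := by omega
  have hc2 : (k + 1 - i + as - 1) / as = d / as + 1 := by
    have : k + 1 - i + as - 1 = d + 1 * as := by ring
    rw [this, Int.add_mul_ediv_right _ _ (by omega)]
  by_cases hdvd : k % as = i % as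
  · -- as divides d
    have hdv : as ∣ d := by
      have := Int.sub_emod k i as
      rw [hdvd, sub_self, Int.zero_emod] at this
      exact Int.dvd_of_emod_eq_zero (by omega)
    obtain ⟨q, hq⟩ := hdv
    have hq0 : 0 ≤ q := by nlinarith
    have hdq : d / as = q := by rw [hq, Int.mul_ediv_cancel_left _ (by omega)]
    have hc1 : (if i < k then ((k - i + as - 1) / as).toNat else 0) = q.toNat := by
      by_cases hik' : i < k
      · rw [if_pos hik']
        have hq1 : 1 ≤ q := by nlinarith
        have : k - i + as - 1 = (as - 1) + (q - 1 + 1) * as := by rw [← hd, hq]; ring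
        rw [this, Int.add_mul_ediv_right _ _ (by omega),
            Int.ediv_eq_zero_of_lt (by omega) (by omega)]
        omega
      · rw [if_neg hik']
        have : q = 0 := by nlinarith
        simp [this]
    rw [if_pos hdvd, hc1, hc2, hdq]
    have : (q + 1).toNat = q.toNat + 1 := by omega
    rw [this, List.range_succ, List.map_append]
    congr 1
    simp only [List.map_cons, List.map_nil]
    congr 1
    have : (q.toNat : Int) = q := by omega
    rw [this]; omega
  · -- as does not divide d
    have hndv : ¬ as ∣ d := by
      intro ⟨q, hq⟩
      apply hdvd
      have : k = i + as * q := by omega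
      rw [this, Int.add_mul_emod_self_left]
    set q : Int := d / as with hqdef
    set r : Int := d % as with hrdef
    have hr0 : 0 ≤ r := Int.emod_nonneg _ (by omega)
    have hrlt : r < as := Int.emod_lt_of_pos _ has
    have hrne : r ≠ 0 := fun h => hndv (Int.dvd_of_emod_eq_zero (by omega))
    have hdqr : d = as * q + r := (Int.ediv_add_emod d as).symm
    have hq0 : 0 ≤ q := Int.ediv_nonneg hd0 has.le
    have hrpos : 0 < r := by omega
    have hdpos : 0 < d := by nlinarith [mul_nonneg has.le hq0]
    have hikk : i < k := by omega
    have hc1 : (k - i + as - 1) / as = q + 1 := by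
      have : k - i + as - 1 = (r - 1) + (q + 1) * as := by rw [← hd, hdqr]; ring
      rw [this, Int.add_mul_ediv_right _ _ (by omega),
          Int.ediv_eq_zero_of_lt (by omega) (by omega)]
      ring
    rw [if_neg hdvd, if_pos hikk, hc1, hc2]
    simp

-- updating one row of the row table
lemma rows_set (as : Int) (has : 0 < as) (f g : Int → List Int) (j : Int)
    (hj0 : 0 ≤ j) (_hj : j < as)
    (hfg : ∀ i : Int, 0 ≤ i → i < as → i ≠ j → f i = g i) :
    PySem.List.pySetD ((PySem.List.pyRange 0 as 1).map f) j (g j) =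
      (PySem.List.pyRange 0 as 1).map g := by
  rw [PySem.List.pySetD_of_nonneg _ _ hj0]
  apply List.ext_getElem
  · simp
  · intro m hm1 hm2
    simp only [List.length_set, List.length_map, PySem.List.length_pyRange_one] at hm1
    rw [List.getElem_set]
    have hmas : (m : Int) < as := by omega
    have hmlen : m < (PySem.List.pyRange 0 as 1).length := by
      rw [PySem.List.length_pyRange_one]; omega
    have hrm : (PySem.List.pyRange 0 as 1)[m]'hmlen = (m : Int) := by
      rw [PySem.List.getElem_pyRange_one]; omega
    by_cases hmj : j.toNat = m
    · rw [if_pos hmj]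
      rw [List.getElem_map, hrm]
      have : (m : Int) = j := by omega
      rw [this]
    · rw [if_neg hmj]
      rw [List.getElem_map, List.getElem_map, hrm]
      exact hfg _ (by omega) hmas (by omega)

-- the invariant of A's dispatch loop (positive amount_statistics, first n flat indices processed)
lemma loopA (as : Int) (has : 0 < as) (n : Nat) :
    (PySem.List.pyRange 0 (n : Int) 1).foldl (stepA as)
        ((PySem.List.pyRange 0 as 1).map (fun i => PySem.List.pyRange i 0 as), -1)
      = ((PySem.List.pyRange 0 as 1).map (fun i => PySem.List.pyRange i (n : Int) as),
         if n = 0 then -1 else ((n : Int) - 1) % as) := by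
  induction n with
  | zero =>
    have h0 : PySem.List.pyRange 0 ((0 : Nat) : Int) 1 = [] :=
      PySem.List.pyRange_one_eq_nil (by simp)
    rw [h0]; simp
  | succ n ih =>
    have hcast : ((n + 1 : Nat) : Int) = (n : Int) + 1 := by push_cast; ring
    rw [hcast, PySem.List.pyRange_one_succ_right (by omega), List.foldl_append, ih]
    simp only [List.foldl_cons, List.foldl_nil]
    set j : Int := (n : Int) % as with hjdef
    have hj0 : 0 ≤ j := Int.emod_nonneg _ (by omega)
    have hjlt : j < as := Int.emod_lt_of_pos _ has
    have hdiv : PySem.Int.mod ((if n = 0 then (-1 : Int) else ((n : Int) - 1) % as) + 1) as = j := by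
      rw [mod_pos_eq _ _ has]
      by_cases hn : n = 0
      · simp [hn, hjdef]
      · rw [if_neg hn]
        have hq := Int.ediv_add_emod ((n : Int) - 1) as
        have hneg : as * (-(((n : Int) - 1) / as)) = -(as * (((n : Int) - 1) / as)) := by ring
        have : ((n : Int) - 1) % as + 1 = (n : Int) + as * (-(((n : Int) - 1) / as)) := by omega
        rw [this, Int.add_mul_emod_self_left]
    have hjn : j ≤ (n : Int) := by
      have hq := Int.ediv_add_emod (n : Int) as
      have : 0 ≤ ((n : Int) / as) := Int.ediv_nonneg (by omega) has.le
      nlinarith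
    unfold stepA
    simp only [hdiv]
    have hget : PySem.List.pyGetD ((PySem.List.pyRange 0 as 1).map
        (fun i => PySem.List.pyRange i (n : Int) as)) j ([] : List Int)
        = PySem.List.pyRange j (n : Int) as :=
      PySem.List.pyGetD_map_pyRange_of_nonneg _ _ _ _ hj0 hjlt
    rw [hget, Prod.mk.injEq]
    constructor
    · have hrow : PySem.List.pyRange j (n : Int) as ++ [(n : Int)]
          = PySem.List.pyRange j ((n : Int) + 1) as := by
        rw [stride_succ as j (n : Int) has hj0 hjn,
            if_pos (by rw [← hjdef, Int.emod_emod_of_dvd _ dvd_rfl])]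
      rw [hrow]
      exact rows_set as has (fun i => PySem.List.pyRange i (n : Int) as)
        (fun i => PySem.List.pyRange i ((n : Int) + 1) as) j hj0 hjlt (by
          intro i hi0 hilt hij
          show PySem.List.pyRange i (n : Int) as = PySem.List.pyRange i ((n : Int) + 1) as
          by_cases hin : i ≤ (n : Int)
          · rw [stride_succ as i (n : Int) has hi0 hin,
              if_neg (by rw [Int.emod_eq_of_lt hi0 hilt, ← hjdef]; omega), List.append_nil]

          · rw [stride_nil as i ((n : Int) + 1) has (by omega),
              stride_nil as i (n : Int) has (by omega)])
    · rw [if_neg (Nat.succ_ne_zero n), hjdef]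
      push_cast
      ring_nf

lemma init_rows (as : Int) :
    (PySem.List.pyRange 0 as 1).foldl (fun r _x => r ++ [([] : List Int)]) []
      = (PySem.List.pyRange 0 as 1).map (fun i => PySem.List.pyRange i 0 as) := by
  rw [PySem.List.foldl_append_singleton_eq_map]
  simp only [List.nil_append]
  apply List.map_congr_left
  intro i hi
  rw [PySem.List.mem_pyRange_one] at hi
  by_cases has : 0 < as
  · rw [stride_nil as i 0 has hi.1]
  · exact absurd hi.2 (by omega)

-- ===== VERDICT (by name: the statement is the Claim_ definition above) =====
theorem get_ticks_spec : Claim_equal_get_ticks := by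
  intro cv as _ hpre
  unfold Pre_get_ticks at hpre
  unfold Spec_get_ticks get_ticks_alt
  rw [get_ticks_eq]
  by_cases has : 0 < as
  · by_cases hcv : 0 ≤ cv
    · have hn : cv * as = (((cv * as).toNat : Nat) : Int) := by
        have : 0 ≤ cv * as := mul_nonneg hcv has.le
        omega
      rw [init_rows, hn, loopA as has (cv * as).toNat]
    · have hcd : cv * as < 0 := mul_neg_of_neg_of_pos (by omega) has
      rw [PySem.List.pyRange_one_eq_nil (a := 0) (b := cv * as) (by omega)]
      simp only [List.foldl_nil]
      rw [init_rows]
      apply List.map_congr_left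
      intro i hi
      rw [PySem.List.mem_pyRange_one] at hi
      rw [stride_nil as i 0 has hi.1, stride_nil as i (cv * as) has (by omega)]
  · have hcd : cv * as ≤ 0 := by
      rcases hpre with h | h
      · exact mul_nonpos_iff.mpr (Or.inl ⟨h, by omega⟩)
      · have : as = 0 := by omega
        simp [this]
    rw [PySem.List.pyRange_one_eq_nil (a := 0) (b := as) (by omega)]
    rw [PySem.List.pyRange_one_eq_nil (a := 0) (b := cv * as) (by omega)]
    simp
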